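-- pv_equiv track=rewrite | github.com/vlad-marlo/algorithms | school/webium/individuals/19/27_7275.py | solution
-- ===== SOURCE A (Python) =====
-- def solution(m: int, data: list[int]) -> int:
--     data = list(map(lambda x: x // 30 + (x % 30 > 0), data))
--     sm = sum(data[:2 * m + 1]) - data[m]
--     res = 0 if data[m] == 0 else sm
--     for i in range(2 * m + 1, len(data)):
--         sm += data[i] - data[i - 2 * m - 1] + data[i - m - 1] - data[i - m]
--         res = max(res, sm if data[i - m] else 0)
--     return res
-- ===== SOURCE B (Python) =====
-- def solution(m: int, data: list[int]) -> int:
--     t = [x // 30 + (x % 30 > 0) for x in data]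
--     n = len(t)
--     pre = [0]
--     for x in t:
--         pre.append(pre[-1] + x)
--
--     def cand(c):
--         return pre[min(c + m + 1, n)] - pre[max(c - m, 0)] - t[c] if t[c] else 0
--
--     return max(cand(c) for c in range(m, max(m + 1, n - m)))
-- ===== Notes on version B (the rewrite author's own statement) =====
-- stated objective: alternative
-- what changed: B precomputes a prefix-sum array and reads every window sum off it directly as pre[hi]-pre[lo], taking the max of the candidates, instead of A's incremental four-term sliding-window update carried through the loop.
import Mathlib
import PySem

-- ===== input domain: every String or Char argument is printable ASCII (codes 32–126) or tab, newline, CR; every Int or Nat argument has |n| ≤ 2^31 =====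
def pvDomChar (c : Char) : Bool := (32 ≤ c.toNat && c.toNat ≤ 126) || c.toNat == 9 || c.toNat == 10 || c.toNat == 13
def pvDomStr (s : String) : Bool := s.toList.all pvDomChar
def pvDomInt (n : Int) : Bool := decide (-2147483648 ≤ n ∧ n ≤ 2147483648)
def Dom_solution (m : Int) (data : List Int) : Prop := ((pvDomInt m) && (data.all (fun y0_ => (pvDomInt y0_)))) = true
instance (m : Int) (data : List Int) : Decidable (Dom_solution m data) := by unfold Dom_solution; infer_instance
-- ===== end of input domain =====

-- B replaces A's incremental sliding-window update by a prefix-sum array from which each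
-- window sum is read off directly (objective: alternative decomposition, same cost).

-- ===== PORT A =====
-- x // 30 + (x % 30 > 0), the per-element transformation both versions apply
def pvStep (x : Int) : Int :=
  PySem.Int.floordiv x 30 + (if 0 < PySem.Int.mod x 30 then 1 else 0)

def solution (m : Int) (data : List Int) : Int :=
  let t := data.map pvStep
  let sm := (PySem.List.slice t none (some (2*m+1))).sum - PySem.List.pyGetD t m 0
  let res := if PySem.List.pyGetD t m 0 = 0 then (0:Int) else sm
  ((PySem.List.pyRange (2*m+1) (t.length : Int) 1).foldl
    (fun (st : Int × Int) i =>
      let sm' := st.1 + PySem.List.pyGetD t i 0 - PySem.List.pyGetD t (i-2*m-1) 0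
                 + PySem.List.pyGetD t (i-m-1) 0 - PySem.List.pyGetD t (i-m) 0
      (sm', max st.2 (if PySem.List.pyGetD t (i-m) 0 ≠ 0 then sm' else 0)))
    (sm, res)).2

-- ===== PORT B =====
def solution_alt (m : Int) (data : List Int) : Int :=
  let t := data.map pvStep
  let n : Int := t.length
  let pre := t.foldl (fun pre x => pre ++ [PySem.List.pyGetD pre (-1) 0 + x]) [(0:Int)]
  let cand := fun (c : Int) =>
    if PySem.List.pyGetD t c 0 ≠ 0 then
      PySem.List.pyGetD pre (min (c+m+1) n) 0 - PySem.List.pyGetD pre (max (c-m) 0) 0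
        - PySem.List.pyGetD t c 0
    else (0:Int)
  (PySem.List.max? ((PySem.List.pyRange m (max (m+1) (n-m)) 1).map cand) (fun y => y)).getD 0

-- ===== PRECONDITION & SPEC =====
-- Pre_ excludes exactly the inputs where Python A raises IndexError: m < 0 (the loop's
-- data[i-2*m-1] always overruns, or data[m] itself fails) and m ≥ len(data) (data[m] fails).
def Pre_solution (m : Int) (data : List Int) : Prop := 0 ≤ m ∧ m < (data.length : Int)
instance (m : Int) (data : List Int) : Decidable (Pre_solution m data) := by
  unfold Pre_solution; infer_instance
def pvWitness_solution : Int × List Int := (1, [35, 0, 61])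

def Spec_solution (m : Int) (data : List Int) (out : Int) : Prop := out = solution_alt m data
instance (m : Int) (data : List Int) (out : Int) : Decidable (Spec_solution m data out) := by
  unfold Spec_solution; infer_instance

-- ===== CLAIM (what is proved, stated in full; the proofs are below) =====
def Claim_equal_solution : Prop := ∀ (m : Int) (data : List Int),
  Dom_solution m data → Pre_solution m data → Spec_solution m data (solution m data)

-- ===== LEMMAS AND PROOFS =====
-- prefix sums, window sum and candidate, in pure Nat form
def psum (t : List Int) (k : Nat) : Int := (t.take k).sum
def pvW (t : List Int) (M k : Nat) : Int :=
  psum t (min (k+M+1) t.length) - psum t (k - M) - t.getD k 0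
def pvC (t : List Int) (M k : Nat) : Int := if t.getD k 0 ≠ 0 then pvW t M k else 0

theorem psum_succ (t : List Int) (k : Nat) (h : k < t.length) :
    psum t (k+1) = psum t k + t.getD k 0 := by
  simp [psum, List.sum_take_succ _ _ h, List.getD, List.getElem?_eq_getElem h]

theorem psum_clamp (t : List Int) (k : Nat) :
    psum t (min k t.length) = psum t k := by
  unfold psum
  congr 1
  rw [List.take_eq_take_iff]
  omega

theorem pre_fold (t : List Int) : ∀ (acc : List Int) (a : Int),
    t.foldl (fun pre x => pre ++ [PySem.List.pyGetD pre (-1) 0 + x]) (acc ++ [a])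
      = acc ++ List.scanl (·+·) a t := by
  induction t with
  | nil => intro acc a; simp
  | cons x xs ih =>
    intro acc a
    simp only [List.foldl_cons, List.scanl_cons]
    rw [PySem.List.pyGetD_neg_one_append_singleton]
    have h2 : acc ++ [a] ++ [a + x] = (acc ++ [a]) ++ [a + x] := by simp
    rw [h2, ih (acc ++ [a]) (a + x)]
    simp

theorem scanl_getD (t : List Int) : ∀ (a : Int) (k : Nat), k ≤ t.length →
    (List.scanl (·+·) a t).getD k 0 = a + psum t k := by
  induction t with
  | nil =>
    intro a k h
    have : k = 0 := by simpa using h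
    subst this; simp [psum]
  | cons x xs ih =>
    intro a k h
    cases k with
    | zero => simp [List.scanl_cons, psum]
    | succ k =>
      simp only [List.scanl_cons, List.getD_cons_succ]
      rw [ih (a + x) k (by simpa using h)]
      simp [psum, add_assoc]

theorem pre_pyGetD (t : List Int) (i : Int) (h0 : 0 ≤ i) (h1 : i ≤ (t.length : Int)) :
    PySem.List.pyGetD (List.scanl (·+·) 0 t) i 0 = psum t i.toNat := by
  have : i = ((i.toNat : Nat) : Int) := by omega
  rw [this, PySem.List.pyGetD_natCast, scanl_getD t 0 i.toNat (by omega)]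
  simp only [Int.toNat_natCast, zero_add]

theorem pvW_step (t : List Int) (M a : Nat) (ha : 2*M+1 ≤ a) (hlt : a < t.length) :
    pvW t M (a - (M+1)) + t.getD a 0 - t.getD (a-(2*M+1)) 0 + t.getD (a-(M+1)) 0
      - t.getD (a-M) 0 = pvW t M (a - M) := by
  unfold pvW
  have e1 : min (a - (M+1) + M + 1) t.length = a := by omega
  have e2 : a - (M+1) - M = a - (2*M+1) := by omega
  have e3 : min (a - M + M + 1) t.length = a + 1 := by omega
  have e4 : a - M - M = a - (2*M+1) + 1 := by omega
  rw [e1, e2, e3, e4, psum_succ t a hlt, psum_succ t (a-(2*M+1)) (by omega)]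
  ring

theorem A_inv (t : List Int) (M : Nat) :
    ∀ (K a : Nat) (r sm : Int), 2*M+1 ≤ a → (K = 0 ∨ a + K ≤ t.length) →
    sm = pvW t M (a - (M+1)) →
    (((List.range' a K).map (Nat.cast : Nat → Int)).foldl
      (fun (st : Int × Int) i =>
        let sm' := st.1 + PySem.List.pyGetD t i 0 - PySem.List.pyGetD t (i-2*(M:Int)-1) 0
                   + PySem.List.pyGetD t (i-(M:Int)-1) 0 - PySem.List.pyGetD t (i-(M:Int)) 0
        (sm', max st.2 (if PySem.List.pyGetD t (i-(M:Int)) 0 ≠ 0 then sm' else 0)))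
      (sm, r)).2
    = List.foldl max r ((List.range' (a - M) K).map (pvC t M)) := by
  intro K
  induction K with
  | zero => intro a r sm _ _ _; simp
  | succ K ih =>
    intro a r sm ha hK hsm
    have hK' : a + (K + 1) ≤ t.length := by omega
    rw [List.range'_succ, List.map_cons, List.foldl_cons,
      List.range'_succ, List.map_cons, List.foldl_cons]
    dsimp only
    have g2 : (a:Int) - 2*(M:Int) - 1 = ((a - (2*M+1) : Nat) : Int) := by omega
    have g3 : (a:Int) - (M:Int) - 1 = ((a - (M+1) : Nat) : Int) := by omega
    have g4 : (a:Int) - (M:Int) = ((a - M : Nat) : Int) := by omega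
    rw [g2, g3, g4, PySem.List.pyGetD_natCast, PySem.List.pyGetD_natCast,
      PySem.List.pyGetD_natCast, PySem.List.pyGetD_natCast, hsm,
      pvW_step t M a ha (by omega)]
    rw [ih (a+1) _ _ (by omega) (by omega) (by congr 1; omega)]
    have e : a + 1 - M = a - M + 1 := by omega
    rw [e]
    simp only [pvC]

theorem solution_eq (m : Int) (data : List Int) (h : Pre_solution m data) :
    solution m data =
      List.foldl max (pvC (data.map pvStep) m.toNat m.toNat)
        ((List.range' (m.toNat+1) (data.length - (2*m.toNat+1))).map
          (pvC (data.map pvStep) m.toNat)) := by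
  obtain ⟨hm, hmn⟩ := h
  obtain ⟨M, rfl⟩ : ∃ M : Nat, m = (M:Int) := ⟨m.toNat, by omega⟩
  have hMn : M < data.length := by exact_mod_cast hmn
  unfold solution
  dsimp only
  set t := List.map pvStep data with ht
  have htl : t.length = data.length := by simp [ht]
  set K := data.length - (2*M+1) with hKdef
  -- the range list
  have hrange : PySem.List.pyRange (2*(M:Int)+1) (t.length : Int) 1
      = (List.range' (2*M+1) K).map (Nat.cast : Nat → Int) := by
    rw [PySem.List.pyRange_one, List.range'_eq_map_range, List.map_map]
    have hcnt : (((t.length : Int)) - (2*(M:Int)+1)).toNat = K := by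
      rw [htl]; omega
    rw [hcnt]
    apply List.map_congr_left
    intro k _
    simp only [Function.comp_apply]
    push_cast
    ring
  rw [hrange]
  -- initial sm and res
  have hsl : PySem.List.slice t none (some (2*(M:Int)+1)) = t.take (2*M+1) := by
    rw [PySem.List.slice_to t (by omega)]
    congr 1
  have hgm : PySem.List.pyGetD t ((M:Nat):Int) 0 = t.getD M 0 :=
    PySem.List.pyGetD_natCast t M 0
  have hWM : pvW t M M = psum t (2*M+1) - t.getD M 0 := by
    unfold pvW
    have h1 : M + M + 1 = 2*M+1 := by omega
    have h2 : M - M = 0 := by omega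
    rw [h1, h2]
    have h3 := psum_clamp t (2*M+1)
    rw [htl] at h3 ⊢
    rw [h3]
    simp [psum]
  rw [hsl, hgm]
  have hsm0 : (t.take (2*M+1)).sum - t.getD M 0 = pvW t M M := by
    rw [hWM]; rfl
  rw [hsm0]
  have hres0 : (if t.getD M 0 = 0 then (0:Int) else pvW t M M) = pvC t M M := by
    simp only [pvC, ne_eq, ite_not]
  rw [hres0]
  have := A_inv t M K (2*M+1) (pvC t M M) (pvW t M M) (by omega) (by omega)
    (by congr 1; omega)
  have e5 : 2*M+1 - M = M + 1 := by omega
  rw [e5] at this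
  exact this

theorem cand_eq (m : Int) (data : List Int) (hm : 0 ≤ m) (j : Nat)
    (hj : m.toNat + j < data.length) :
    (if PySem.List.pyGetD (List.map pvStep data) (m + (j:Int)) 0 ≠ 0 then
        PySem.List.pyGetD (List.scanl (fun x1 x2 => x1 + x2) 0 (List.map pvStep data))
              (min (m + (j:Int) + m + 1) (((List.map pvStep data).length : Nat) : Int)) 0 -
            PySem.List.pyGetD (List.scanl (fun x1 x2 => x1 + x2) 0 (List.map pvStep data))
              (max (m + (j:Int) - m) 0) 0 -
          PySem.List.pyGetD (List.map pvStep data) (m + (j:Int)) 0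
      else 0)
    = pvC (List.map pvStep data) m.toNat (m.toNat + j) := by
  have htl : (List.map pvStep data).length = data.length := by simp
  have h1 : m + (j:Int) = ((m.toNat + j : Nat) : Int) := by omega
  have h4 : min (m + (j:Int) + m + 1) (((List.map pvStep data).length : Nat) : Int)
      = ((min (m.toNat + j + m.toNat + 1) (List.map pvStep data).length : Nat) : Int) := by
    rw [htl]; omega
  have h2 : max (m + (j:Int) - m) 0 = ((j : Nat) : Int) := by omega
  rw [h4, h2, h1, PySem.List.pyGetD_natCast,
    pre_pyGetD _ _ (by omega) (by rw [htl]; omega),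
    pre_pyGetD _ _ (by omega) (by rw [htl]; omega)]
  simp only [Int.toNat_natCast, pvC, pvW, Nat.add_sub_cancel_left]

theorem solution_alt_eq (m : Int) (data : List Int) (h : Pre_solution m data) :
    solution_alt m data =
      List.foldl max (pvC (data.map pvStep) m.toNat m.toNat)
        ((List.range' (m.toNat+1) (data.length - (2*m.toNat+1))).map
          (pvC (data.map pvStep) m.toNat)) := by
  obtain ⟨hm, hmn⟩ := h
  unfold solution_alt
  dsimp only
  have hfold := pre_fold (data.map pvStep) [] 0
  simp only [List.nil_append] at hfold
  rw [hfold, PySem.List.pyRange_one]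
  have hL : (max (m+1) (((data.map pvStep).length : Int) - m) - m).toNat
      = (data.length - (2*m.toNat+1)) + 1 := by
    simp only [List.length_map]; omega
  rw [hL, List.range_succ_eq_map]
  simp only [List.map_cons, List.map_map, PySem.List.max?_id_cons, Option.getD_some]
  congr 1
  · have hh := cand_eq m data hm 0 (by omega)
    simpa using hh
  · rw [List.range'_eq_map_range, List.map_map]
    apply List.map_congr_left
    intro k hk
    have hk' : k < data.length - (2 * m.toNat + 1) := List.mem_range.mp hk
    have hb : m.toNat + (k + 1) < data.length := by omega
    have hh := cand_eq m data hm (k + 1) hb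
    have e2 : m.toNat + 1 + k = m.toNat + (k + 1) := by omega
    simp only [Function.comp_apply, e2]
    rw [← hh]

-- ===== VERDICT (by name: the statement is the Claim_ definition above) =====
theorem solution_spec : Claim_equal_solution := by
  intro m data _ hpre
  unfold Spec_solution
  rw [solution_eq m data hpre, solution_alt_eq m data hpre]
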